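-- pv_equiv track=rewrite | github.com/444chak/adventofcode | adventofcode24/day9/day9.py | get_first_free_space
-- ===== SOURCE A (Python) =====
-- def get_first_free_space(disk):
--     free_size = 0
--     free_start = 0
--     for index, k in enumerate(disk):
--         if k == None:
--             free_size += 1
--         else:
--             if free_size > 0:
--                 return free_start, free_size
--             free_start = index + 1
--             free_size = 0
--
--     return free_start, free_size
-- ===== SOURCE B (Python) =====
-- def get_first_free_space(disk):
--     n = len(disk)
--     i = 0
--     while i < n and disk[i] != None:
--         i += 1
--     start = i
--     while i < n and disk[i] == None:
--         i += 1
--     return start, i - start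
-- ===== Notes on version B (the rewrite author's own statement) =====
-- stated objective: simpler
-- what changed: Replaces the single-pass state machine (tracking free_start/free_size with an early return) by two sequential index scans: advance past the leading occupied blocks to find the run start, then advance through the free run and return its length as an index difference.
import Mathlib
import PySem

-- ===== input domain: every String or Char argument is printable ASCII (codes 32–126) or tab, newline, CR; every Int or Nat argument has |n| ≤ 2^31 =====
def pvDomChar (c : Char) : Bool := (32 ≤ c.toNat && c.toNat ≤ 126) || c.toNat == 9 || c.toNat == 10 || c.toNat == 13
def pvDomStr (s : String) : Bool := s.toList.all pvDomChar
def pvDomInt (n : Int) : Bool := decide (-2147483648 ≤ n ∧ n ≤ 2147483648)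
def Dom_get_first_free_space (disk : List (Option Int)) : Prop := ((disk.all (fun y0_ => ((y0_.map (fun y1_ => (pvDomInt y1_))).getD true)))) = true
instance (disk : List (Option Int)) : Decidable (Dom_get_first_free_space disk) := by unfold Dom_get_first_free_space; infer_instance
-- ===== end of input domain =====

-- B is a simpler decomposition of the same linear scan: two sequential index loops instead of A's
-- single state-machine loop with an early return; return value only, no side effects.

-- ===== PORT A =====
-- A's for-loop over enumerate(disk) with early return, state (free_start, free_size).
def getFirstFreeGoA (rem : List (Option Int)) (index free_start free_size : Int) : Int × Int :=
  match rem with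
  | [] => (free_start, free_size)
  | k :: rest =>
    if k = none then
      getFirstFreeGoA rest (index + 1) free_start (free_size + 1)
    else
      if free_size > 0 then (free_start, free_size)
      else getFirstFreeGoA rest (index + 1) (index + 1) 0

def get_first_free_space (disk : List (Option Int)) : Int × Int :=
  getFirstFreeGoA disk 0 0 0

-- ===== PORT B =====
-- first while loop: advance i while i < n and disk[i] != None
def getFirstFreeSkipOcc (disk : List (Option Int)) (i : Nat) : Nat :=
  if h : i < disk.length then
    if disk[i] ≠ none then getFirstFreeSkipOcc disk (i + 1) else i
  else i
termination_by disk.length - i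
decreasing_by omega

-- second while loop: advance i while i < n and disk[i] == None
def getFirstFreeSkipFree (disk : List (Option Int)) (i : Nat) : Nat :=
  if h : i < disk.length then
    if disk[i] = none then getFirstFreeSkipFree disk (i + 1) else i
  else i
termination_by disk.length - i
decreasing_by omega

def get_first_free_space_alt (disk : List (Option Int)) : Int × Int :=
  let start := getFirstFreeSkipOcc disk 0
  let i := getFirstFreeSkipFree disk start
  ((start : Int), (i : Int) - (start : Int))

-- ===== PRECONDITION & SPEC =====
def Spec_get_first_free_space (disk : List (Option Int)) (out : Int × Int) : Prop := out = get_first_free_space_alt disk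
instance (disk : List (Option Int)) (out : Int × Int) : Decidable (Spec_get_first_free_space disk out) := by unfold Spec_get_first_free_space; infer_instance

-- ===== CLAIM (what is proved, stated in full; the proofs are below) =====
def Claim_equal_get_first_free_space : Prop := ∀ (disk : List (Option Int)), Dom_get_first_free_space disk → Spec_get_first_free_space disk (get_first_free_space disk)

-- ===== LEMMAS AND PROOFS =====

-- number of leading occupied (non-none) blocks
def pvLeadOcc : List (Option Int) → Nat
  | [] => 0
  | k :: rest => if k = none then 0 else pvLeadOcc rest + 1

-- number of leading free (none) blocks
def pvLeadFree : List (Option Int) → Nat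
  | [] => 0
  | k :: rest => if k = none then pvLeadFree rest + 1 else 0

theorem skipOcc_eq (disk : List (Option Int)) (i : Nat) :
    getFirstFreeSkipOcc disk i = i + pvLeadOcc (disk.drop i) := by
  fun_induction getFirstFreeSkipOcc disk i with
  | case1 i h hk ih =>
    rw [ih, List.drop_eq_getElem_cons h, pvLeadOcc]
    simp [hk]; omega
  | case2 i h hk =>
    simp only [ne_eq, not_not] at hk
    rw [List.drop_eq_getElem_cons h, pvLeadOcc]
    simp [hk]
  | case3 i h =>
    rw [List.drop_eq_nil_iff.mpr (by omega)]
    simp [pvLeadOcc]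

theorem skipFree_eq (disk : List (Option Int)) (i : Nat) :
    getFirstFreeSkipFree disk i = i + pvLeadFree (disk.drop i) := by
  fun_induction getFirstFreeSkipFree disk i with
  | case1 i h hk ih =>
    rw [ih, List.drop_eq_getElem_cons h, pvLeadFree]
    simp [hk]; omega
  | case2 i h hk =>
    rw [List.drop_eq_getElem_cons h, pvLeadFree]
    simp [hk]
  | case3 i h =>
    rw [List.drop_eq_nil_iff.mpr (by omega)]
    simp [pvLeadFree]

-- counting phase of A: once free_size > 0, A returns (free_start, free_size + leading frees)
theorem goA_count (rem : List (Option Int)) (index free_start free_size : Int)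
    (hpos : free_size > 0) :
    getFirstFreeGoA rem index free_start free_size = (free_start, free_size + pvLeadFree rem) := by
  induction rem generalizing index free_size with
  | nil => simp [getFirstFreeGoA, pvLeadFree]
  | cons k rest ih =>
    by_cases hk : k = none
    · rw [getFirstFreeGoA]
      simp only [hk]
      rw [ih _ _ (by omega), pvLeadFree]
      simp; ring
    · rw [getFirstFreeGoA]
      simp only [hk, if_pos hpos, pvLeadFree]
      simp

-- skipping phase of A (free_size = 0, free_start = index)
theorem goA_skip (rem : List (Option Int)) (i : Int) :
    getFirstFreeGoA rem i i 0 =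
      ((i + pvLeadOcc rem : Int), (pvLeadFree (rem.drop (pvLeadOcc rem)) : Int)) := by
  induction rem generalizing i with
  | nil => simp [getFirstFreeGoA, pvLeadOcc, pvLeadFree]
  | cons k rest ih =>
    by_cases hk : k = none
    · rw [getFirstFreeGoA]
      simp only [hk, if_pos trivial]
      norm_num
      rw [goA_count rest (i + 1) i 1 (by omega)]
      simp [pvLeadOcc, pvLeadFree]; ring
    · rw [getFirstFreeGoA]
      simp only [hk]
      norm_num
      rw [ih (i + 1)]
      simp only [pvLeadOcc, if_neg hk, List.drop_succ_cons]
      refine Prod.ext ?_ rfl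
      push_cast; ring

-- ===== VERDICT (by name: the statement is the Claim_ definition above) =====
theorem get_first_free_space_spec : Claim_equal_get_first_free_space := by
  intro disk _
  unfold Spec_get_first_free_space get_first_free_space get_first_free_space_alt
  rw [goA_skip disk 0, skipOcc_eq disk 0]
  simp only [List.drop_zero, Nat.zero_add]
  rw [skipFree_eq disk (pvLeadOcc disk)]
  refine Prod.ext (by push_cast; ring) (by push_cast; ring)
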